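-- pv_equiv track=rewrite | github.com/aratrikghosh2011-tech/numclassify | numclassify/_core/primes.py | _lucky_numbers_up_to
-- ===== SOURCE A (Python) =====
-- def _lucky_numbers_up_to(n: int) -> frozenset:
--     """Return the set of lucky numbers up to *n* via the lucky-number sieve.
--
--     The sieve starts with odd positive integers [1, 3, 5, 7, …] and
--     repeatedly removes every *k*-th remaining element where *k* is the second
--     element (3), then third element (7), and so on.
--
--     Parameters
--     ----------
--     n:
--         Upper bound (inclusive).
--
--     Returns
--     -------
--     frozenset[int]
--     """
--     if n < 1:
--         return frozenset()
--     # Start with odd numbers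
--     sieve = list(range(1, n + 1, 2))
--     idx = 1  # Start with the second element
--     while idx < len(sieve):
--         step = sieve[idx]
--         # Remove every step-th element (1-indexed)
--         sieve = [v for i, v in enumerate(sieve) if (i + 1) % step != 0]
--         idx += 1
--         if idx >= len(sieve):
--             break
--     return frozenset(sieve)
-- ===== SOURCE B (Python) =====
-- def _lucky_numbers_up_to(n: int) -> frozenset:
--     """Lucky numbers up to n by a per-candidate survival test: instead of
--     rebuilding the whole sieve list pass after pass, each odd candidate's
--     1-indexed position is pushed through the steps (the lucky numbers
--     already found) until some step divides it (eliminated) or every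
--     remaining step exceeds it (it survives and is itself lucky)."""
--     if n < 1:
--         return frozenset()
--     lucky = []
--     for x in range(1, n + 1, 2):
--         p = (x + 1) // 2
--         i = 1
--         ok = True
--         while i < len(lucky) and lucky[i] <= p:
--             if p % lucky[i] == 0:
--                 ok = False
--                 break
--             p -= p // lucky[i]
--             i += 1
--         if ok:
--             lucky.append(x)
--     return frozenset(lucky)
-- ===== Notes on version B (the rewrite author's own statement) =====
-- stated objective: faster
-- what changed: Replaces the pass-by-pass sieve that rebuilds the whole survivor list for every step with a per-candidate survival test: each odd candidate's position among the odds is pushed through the already-found lucky steps (p -> p - p//s, eliminated when s divides p), so no survivor list is ever rebuilt.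
import Mathlib
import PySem

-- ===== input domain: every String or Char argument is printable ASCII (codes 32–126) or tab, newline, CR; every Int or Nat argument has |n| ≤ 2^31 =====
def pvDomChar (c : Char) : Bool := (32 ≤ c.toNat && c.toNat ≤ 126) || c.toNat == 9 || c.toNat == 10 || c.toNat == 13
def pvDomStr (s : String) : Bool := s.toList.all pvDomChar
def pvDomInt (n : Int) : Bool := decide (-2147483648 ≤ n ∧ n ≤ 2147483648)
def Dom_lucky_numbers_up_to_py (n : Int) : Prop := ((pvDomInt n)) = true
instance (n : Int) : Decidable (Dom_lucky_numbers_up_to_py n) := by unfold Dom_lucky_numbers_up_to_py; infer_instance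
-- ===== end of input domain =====

-- B replaces the pass-by-pass sieve (which rebuilds the whole survivor list for every
-- step) with a per-candidate survival test pushing each odd number's 1-indexed
-- position through the already-found lucky steps (objective: faster; measured faster
-- in a timing run).

-- ===== PORT A =====
-- sieve = [v for i, v in enumerate(sieve) if (i + 1) % step != 0]
def pvFilterA (step : Int) (l : List Int) : List Int :=
  ((PySem.List.enumerate l 0).filter (fun p => !(PySem.Int.mod (p.1 + 1) step == 0))).map (·.2)

theorem pvFilterA_length_le (step : Int) (l : List Int) :
    (pvFilterA step l).length ≤ l.length := by
  unfold pvFilterA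
  calc (((PySem.List.enumerate l 0).filter _).map (·.2)).length
      = ((PySem.List.enumerate l 0).filter _).length := List.length_map ..
    _ ≤ (PySem.List.enumerate l 0).length := List.length_filter_le ..
    _ = l.length := PySem.List.length_enumerate ..

-- while idx < len(sieve): step = sieve[idx]; sieve = <filter>; idx += 1
-- (the trailing 'if idx >= len(sieve): break' just restates the loop guard)
def pvLoopA (sieve : List Int) (idx : Nat) : List Int :=
  if h : idx < sieve.length then
    pvLoopA (pvFilterA sieve[idx] sieve) (idx + 1)
  else sieve
termination_by sieve.length - idx
decreasing_by have := pvFilterA_length_le sieve[idx] sieve; omega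

def lucky_numbers_up_to_py (n : Int) : List Int :=
  if n < 1 then []
  else PySem.Set.ofList (pvLoopA (PySem.List.pyRange 1 (n + 1) 2) 1)

-- ===== PORT B =====
-- while i < len(lucky) and lucky[i] <= p: if p % lucky[i] == 0: ok=False; break
--                                         p -= p // lucky[i]; i += 1
def pvTestB (lucky : List Int) (p : Int) (i : Nat) : Bool :=
  if h : i < lucky.length then
    if lucky[i] ≤ p then
      if PySem.Int.mod p lucky[i] == 0 then false
      else pvTestB lucky (p - PySem.Int.floordiv p lucky[i]) (i + 1)
    else true
  else true
termination_by lucky.length - i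

-- for x in range(1, n + 1, 2): p = (x+1)//2; ... ; if ok: lucky.append(x)
def pvFoldB (xs : List Int) (lucky : List Int) : List Int :=
  match xs with
  | [] => lucky
  | x :: rest =>
    let ok := pvTestB lucky (PySem.Int.floordiv (x + 1) 2) 1
    pvFoldB rest (if ok then lucky ++ [x] else lucky)

def lucky_numbers_up_to_py_alt (n : Int) : List Int :=
  if n < 1 then []
  else PySem.Set.ofList (pvFoldB (PySem.List.pyRange 1 (n + 1) 2) [])

-- ===== PRECONDITION & SPEC =====
def Spec_lucky_numbers_up_to_py (n : Int) (out : List Int) : Prop := out = lucky_numbers_up_to_py_alt n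
instance (n : Int) (out : List Int) : Decidable (Spec_lucky_numbers_up_to_py n out) := by unfold Spec_lucky_numbers_up_to_py; infer_instance

-- ===== CLAIM (what is proved, stated in full; the proofs are below) =====
def Claim_equal_lucky_numbers_up_to_py : Prop := ∀ (n : Int), Dom_lucky_numbers_up_to_py n → Spec_lucky_numbers_up_to_py n (lucky_numbers_up_to_py n)

-- ===== LEMMAS AND PROOFS =====

-- proof-side normal form of one sieve pass with step s: keep s-1 of every s elements
def pvChunkSpec (s : Nat) : List Int → List Int
  | [] => []
  | x :: xs => (x :: xs).take (s - 1) ++ pvChunkSpec s (xs.drop (s - 1))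
termination_by l => l.length
decreasing_by exact Nat.lt_succ_of_le (by simpa using List.length_drop_le (s - 1) xs)

-- ---- A's comprehension equals pvChunkSpec (phase-tracking argument) ----
def pvPhaseF (s : Nat) : Nat → List Int → List Int
  | _, [] => []
  | p, x :: xs => if p = s - 1 then pvPhaseF s 0 xs else x :: pvPhaseF s (p + 1) xs

theorem pv_mod_succ (s k : Nat) (hs : 1 ≤ s) :
    (k + 1) % s = if k % s = s - 1 then 0 else k % s + 1 := by
  have hlt : k % s < s := Nat.mod_lt k (by omega)
  have hmm : (k % s + 1) % s = (k + 1) % s := Nat.mod_add_mod k s 1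
  by_cases h : k % s = s - 1
  · rw [if_pos h, ← hmm, h, show s - 1 + 1 = s by omega, Nat.mod_self]
  · rw [if_neg h, ← hmm, Nat.mod_eq_of_lt (by omega)]

theorem pvFilterA_eq_phase (sN : Nat) (hs : 1 ≤ sN) (l : List Int) :
    ∀ (k : Nat),
      ((PySem.List.enumerate l (k : Int)).filter
          (fun p => !(PySem.Int.mod (p.1 + 1) (sN : Int) == 0))).map (·.2)
      = pvPhaseF sN (k % sN) l := by
  induction l with
  | nil => intro k; simp [PySem.List.enumerate_nil, pvPhaseF]
  | cons x xs ih =>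
    intro k
    rw [PySem.List.enumerate_cons, List.filter_cons]
    have hk1 : ((k : Int) + 1) = (((k + 1 : Nat)) : Int) := by push_cast; ring
    have hc : PySem.Int.mod ((k : Int) + 1) (sN : Int) = (((k + 1) % sN : Nat) : Int) := by
      rw [hk1, PySem.Int.mod_natCast]
    have hsucc := pv_mod_succ sN k hs
    by_cases h : k % sN = sN - 1
    · have hz : (k + 1) % sN = 0 := by rw [hsucc, if_pos h]
      have : (!(PySem.Int.mod ((k : Int) + 1) (sN : Int) == 0)) = false := by
        simp [hc, hz]
      simp only [this, Bool.false_eq_true, if_false]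
      rw [hk1, ih (k + 1), hz, pvPhaseF, if_pos h]
    · have hz : (k + 1) % sN = k % sN + 1 := by rw [hsucc, if_neg h]
      have : (!(PySem.Int.mod ((k : Int) + 1) (sN : Int) == 0)) = true := by
        simp [hc, hz]
        omega
      simp only [this, if_true, List.map_cons]
      rw [hk1, ih (k + 1), hz, pvPhaseF, if_neg h]

theorem pvPhase_eq_chunk (sN : Nat) (hs : 1 ≤ sN) (l : List Int) :
    ∀ (p : Nat), p < sN →
      pvPhaseF sN p l = l.take (sN - 1 - p) ++ pvChunkSpec sN (l.drop (sN - p)) := by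
  induction l with
  | nil => intro p _; simp [pvPhaseF, pvChunkSpec]
  | cons x xs ih =>
    intro p hp
    by_cases h : p = sN - 1
    · rw [pvPhaseF, if_pos h, ih 0 (by omega)]
      have h1 : sN - 1 - p = 0 := by omega
      have h2 : sN - p = 1 := by omega
      rw [h1, h2]
      simp only [List.take_zero, List.nil_append, List.drop_one, List.tail_cons,
        List.take_zero, Nat.sub_zero]
      cases xs with
      | nil => simp [pvChunkSpec]
      | cons y ys =>
        rw [pvChunkSpec]
        congr 1
        cases sN with
        | zero => omega
        | succ m => simp
    · rw [pvPhaseF, if_neg h, ih (p + 1) (by omega)]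
      have h1 : sN - 1 - p = (sN - 1 - (p + 1)) + 1 := by omega
      have h2 : sN - p = (sN - (p + 1)) + 1 := by omega
      rw [h1, h2, List.take_succ_cons, List.drop_succ_cons]
      simp

theorem pvFilterA_eq_chunkSpec (sN : Nat) (hs : 1 ≤ sN) (l : List Int) :
    pvFilterA (sN : Int) l = pvChunkSpec sN l := by
  unfold pvFilterA
  have h0 := pvFilterA_eq_phase sN hs l 0
  simp only [Nat.cast_zero] at h0
  rw [h0, Nat.zero_mod, pvPhase_eq_chunk sN hs l 0 (by omega)]
  cases l with
  | nil => simp [pvChunkSpec]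
  | cons x xs =>
    have hdrop : List.drop (sN - 0) (x :: xs) = List.drop (sN - 1) xs := by
      cases sN with
      | zero => omega
      | succ m => simp
    rw [pvChunkSpec, hdrop]
    simp

-- ---- structural lemmas about pvChunkSpec ----
theorem chunk_sublist (s : Nat) (l : List Int) : (pvChunkSpec s l).Sublist l := by
  induction hm : l.length using Nat.strong_induction_on generalizing l with
  | _ m ih =>
    cases l with
    | nil => simp [pvChunkSpec]
    | cons x xs =>
      rw [pvChunkSpec]
      have h2 : (pvChunkSpec s (xs.drop (s - 1))).Sublist (xs.drop (s - 1)) := by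
        refine ih (xs.drop (s - 1)).length ?_ _ rfl
        subst hm
        simp only [List.length_cons, List.length_drop]
        omega
      have h3 : (xs.drop (s - 1)).Sublist ((x :: xs).drop (s - 1)) := by
        cases hs : s - 1 with
        | zero => simpa using List.sublist_cons_self x xs
        | succ k =>
          rw [List.drop_succ_cons]
          have : xs.drop (k + 1) = (xs.drop k).drop 1 := by
            rw [List.drop_drop]
          rw [this]
          exact List.drop_sublist 1 (xs.drop k)
      have h4 := List.Sublist.append_left (h2.trans h3) ((x :: xs).take (s - 1))
      have h6 : (List.take (s - 1) (x :: xs) ++ List.drop (s - 1) (x :: xs)).Sublist (x :: xs) := by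
        rw [List.take_append_drop]
      exact h4.trans h6

theorem chunk_take (s : Nat) (l : List Int) (k : Nat) (hk : k ≤ s - 1) :
    (pvChunkSpec s l).take k = l.take k := by
  cases l with
  | nil => simp [pvChunkSpec]
  | cons x xs =>
    rcases Nat.eq_zero_or_pos k with rfl | hk0
    · simp
    have hs2 : 2 ≤ s := by omega
    rw [pvChunkSpec, List.take_append]
    have h1 : List.take k (List.take (s - 1) (x :: xs)) = List.take k (x :: xs) := by
      rw [List.take_take, Nat.min_eq_left hk]
    rw [h1]
    by_cases hlen : k ≤ (List.take (s - 1) (x :: xs)).length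
    · rw [Nat.sub_eq_zero_of_le hlen, List.take_zero, List.append_nil]
    · have hlen2 : (x :: xs).length < k := by
        simp only [List.length_take] at hlen
        omega
      have hxs : xs.drop (s - 1) = [] := by
        apply List.drop_eq_nil_of_le
        simp only [List.length_cons] at hlen2
        omega
      rw [hxs, (by simp [pvChunkSpec] : pvChunkSpec s [] = []), List.take_nil, List.append_nil]

theorem chunk_getElem (s : Nat) (hs : 1 ≤ s) (l : List Int) (j : Nat) (hj : j < l.length)
    (hm : (j + 1) % s ≠ 0) :
    (pvChunkSpec s l)[j - (j + 1) / s]? = some l[j] := by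
  induction hlen : l.length using Nat.strong_induction_on generalizing l j with
  | _ m ih =>
    cases l with
    | nil => simp at hj
    | cons x xs =>
      have hs2 : 2 ≤ s := by
        by_contra hcon
        apply hm
        have hs1 : s = 1 := by omega
        rw [hs1]
        exact Nat.mod_one _
      rw [pvChunkSpec]
      by_cases hj1 : j + 1 < s
      · have hdiv : (j + 1) / s = 0 := Nat.div_eq_of_lt hj1
        rw [hdiv, Nat.sub_zero]
        have hjcons : j < xs.length + 1 := by
          simpa using hj
        rw [List.getElem?_append_left
          (by simp only [List.length_take, List.length_cons]; omega)]
        rw [List.getElem?_take, if_pos (by omega), List.getElem?_eq_getElem hj]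
      · have hne : j + 1 ≠ s := by
          intro hcon
          rw [hcon, Nat.mod_self] at hm
          exact hm rfl
        have hjs : s ≤ j := by omega
        set j' := j - s with hj'
        have hjj : j = s + j' := by omega
        have hmod : (j + 1) % s = (j' + 1) % s := by
          rw [hjj, Nat.add_assoc, Nat.add_mod_left]
        have hdiv : (j + 1) / s = (j' + 1) / s + 1 := by
          rw [hjj, Nat.add_assoc, Nat.add_comm s (j' + 1), Nat.add_div_right _ (by omega)]
        have hdle : (j' + 1) / s ≤ j' := by
          by_cases hj'0 : j' = 0
          · rw [hj'0]
            simp [Nat.div_eq_of_lt hs2]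
          · calc (j' + 1) / s ≤ (j' + 1) / 2 := Nat.div_le_div_left hs2 (by omega)
              _ ≤ j' := by omega
        have hidx : j - (j + 1) / s = (s - 1) + (j' - (j' + 1) / s) := by
          rw [hdiv, hjj]; omega
        have hlent : (List.take (s - 1) (x :: xs)).length = s - 1 := by
          simp only [List.length_take, List.length_cons]
          simp only [List.length_cons] at hj
          omega
        rw [hidx, List.getElem?_append_right (by omega)]
        rw [hlent, Nat.add_sub_cancel_left]
        have hj'lt : j' < (xs.drop (s - 1)).length := by
          simp only [List.length_drop]
          simp only [List.length_cons] at hj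
          omega
        have hrec := ih (xs.drop (s - 1)).length
          (by subst hlen; simp only [List.length_cons, List.length_drop]; omega)
          (xs.drop (s - 1)) j' hj'lt (by rw [← hmod]; exact hm) rfl
        rw [hrec]
        have hxlen : s - 1 + j' < xs.length := by
          simp only [List.length_cons] at hj
          omega
        calc (some (List.drop (s - 1) xs)[j'] : Option Int)
            = (List.drop (s - 1) xs)[j']? := (List.getElem?_eq_getElem hj'lt).symm
          _ = xs[s - 1 + j']? := List.getElem?_drop ..
          _ = (x :: xs)[s - 1 + j' + 1]? := (List.getElem?_cons_succ ..).symm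
          _ = (x :: xs)[j]? := by
              congr 1
              omega
          _ = some (x :: xs)[j] := List.getElem?_eq_getElem hj

theorem chunk_mem (s : Nat) (hs : 1 ≤ s) (l : List Int) (x : Int) (hx : x ∈ pvChunkSpec s l) :
    ∃ j, ∃ h : j < l.length, l[j] = x ∧ (j + 1) % s ≠ 0 := by
  suffices H : ∀ (m : Nat) (l : List Int), l.length ≤ m → x ∈ pvChunkSpec s l →
      ∃ j, ∃ h : j < l.length, l[j] = x ∧ (j + 1) % s ≠ 0 from H l.length l le_rfl hx
  intro m
  induction m with
  | zero =>
    intro l hl hx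
    have hnil : l = [] := List.eq_nil_of_length_eq_zero (by omega)
    subst hnil
    simp [pvChunkSpec] at hx
  | succ m ih =>
    intro l hl hx
    cases l with
    | nil => simp [pvChunkSpec] at hx
    | cons y ys =>
      rw [pvChunkSpec] at hx
      rcases List.mem_append.mp hx with hx1 | hx2
      · obtain ⟨j, hjl, hje⟩ := List.mem_iff_getElem.mp hx1
        have hjs : j < s - 1 := by
          simp only [List.length_take] at hjl
          omega
        have hjlen : j < (y :: ys).length := by
          simp only [List.length_take] at hjl
          omega
        refine ⟨j, hjlen, ?_, ?_⟩
        · rw [← hje, List.getElem_take]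
        · rw [Nat.mod_eq_of_lt (by omega)]
          omega
      · obtain ⟨j', hj'l, hj'e, hj'm⟩ := ih (ys.drop (s - 1))
          (by simp only [List.length_cons] at hl; simp only [List.length_drop]; omega) hx2
        have hj'len : j' < ys.length - (s - 1) := by
          simpa using hj'l
        have hlencons : s + j' < (y :: ys).length := by
          simp only [List.length_cons]
          omega
        refine ⟨s + j', hlencons, ?_, ?_⟩
        · have hq : (y :: ys)[s + j']? = some x := by
            calc (y :: ys)[s + j']? = (y :: ys)[(s - 1 + j') + 1]? := by congr 1; omega
              _ = ys[s - 1 + j']? := List.getElem?_cons_succ ..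
              _ = (ys.drop (s - 1))[j']? := (List.getElem?_drop ..).symm
              _ = some x := by rw [List.getElem?_eq_getElem hj'l, hj'e]
          exact Option.some_injective _ (((List.getElem?_eq_getElem hlencons).symm).trans hq)
        · rw [Nat.add_assoc, Nat.add_mod_left]
          exact hj'm

theorem chunk_index_ge (s : Nat) (hs : 1 ≤ s) (l : List Int) (i : Nat)
    (h : i < (pvChunkSpec s l).length) :
    ∃ j, i ≤ j ∧ ∃ hj : j < l.length, (pvChunkSpec s l)[i] = l[j] := by
  suffices H : ∀ (m : Nat) (l : List Int) (i : Nat), l.length ≤ m →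
      ∀ h : i < (pvChunkSpec s l).length,
      ∃ j, i ≤ j ∧ ∃ hj : j < l.length, (pvChunkSpec s l)[i] = l[j] from H l.length l i le_rfl h
  intro m
  induction m with
  | zero =>
    intro l i hl h
    have hnil : l = [] := List.eq_nil_of_length_eq_zero (by omega)
    subst hnil
    simp [pvChunkSpec] at h
  | succ m ih =>
    intro l i hl h
    cases l with
    | nil => simp [pvChunkSpec] at h
    | cons y ys =>
      have h' : i < (List.take (s - 1) (y :: ys) ++ pvChunkSpec s (ys.drop (s - 1))).length := by
        rw [← pvChunkSpec]
        exact h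
      by_cases hi : i < (List.take (s - 1) (y :: ys)).length
      · have hilen : i < (y :: ys).length := by
          simp only [List.length_take] at hi
          omega
        refine ⟨i, le_refl i, hilen, ?_⟩
        have hq : (pvChunkSpec s (y :: ys))[i]? = (y :: ys)[i]? := by
          rw [pvChunkSpec, List.getElem?_append_left hi, List.getElem?_take,
            if_pos (by simp only [List.length_take] at hi; omega)]
        rw [List.getElem?_eq_getElem h, List.getElem?_eq_getElem hilen] at hq
        exact Option.some_injective _ hq
      · have hlent : (List.take (s - 1) (y :: ys)).length = s - 1 := by
          by_contra hcon
          have h1 : (y :: ys).length < s - 1 := by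
            simp only [List.length_take] at hcon hi ⊢
            omega
          have h2 : ys.drop (s - 1) = [] := by
            apply List.drop_eq_nil_of_le
            simp only [List.length_cons] at h1
            omega
          rw [h2, (by simp [pvChunkSpec] : pvChunkSpec s [] = []), List.append_nil] at h'
          omega
        rw [not_lt] at hi
        obtain ⟨j', hij', hj'l, hj'e⟩ := ih (ys.drop (s - 1)) (i - (s - 1))
          (by simp only [List.length_cons] at hl; simp only [List.length_drop]; omega)
          (by rw [List.length_append, hlent] at h'; omega)
        have hj'len : j' < ys.length - (s - 1) := by simpa using hj'l
        have hlencons : s + j' < (y :: ys).length := by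
          simp only [List.length_cons]
          omega
        refine ⟨s + j', by omega, hlencons, ?_⟩
        have hvv : i - (s - 1) < (pvChunkSpec s (ys.drop (s - 1))).length := by
          have h'' := h'
          rw [List.length_append, hlent] at h''
          omega
        have hq : (pvChunkSpec s (y :: ys))[i]?
            = (y :: ys)[s + j']? := by
          calc (pvChunkSpec s (y :: ys))[i]?
              = (pvChunkSpec s (ys.drop (s - 1)))[i - (List.take (s - 1) (y :: ys)).length]? := by
                rw [pvChunkSpec, List.getElem?_append_right (by omega)]
            _ = (pvChunkSpec s (ys.drop (s - 1)))[i - (s - 1)]? := by rw [hlent]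
            _ = some ((pvChunkSpec s (ys.drop (s - 1)))[i - (s - 1)]'hvv) :=
                List.getElem?_eq_getElem hvv
            _ = some (ys.drop (s - 1))[j'] := by rw [hj'e]
            _ = (ys.drop (s - 1))[j']? := (List.getElem?_eq_getElem hj'l).symm
            _ = ys[s - 1 + j']? := List.getElem?_drop ..
            _ = (y :: ys)[(s - 1 + j') + 1]? := (List.getElem?_cons_succ ..).symm
            _ = (y :: ys)[s + j']? := by congr 1; omega
        rw [List.getElem?_eq_getElem h, List.getElem?_eq_getElem hlencons] at hq
        exact Option.some_injective _ hq

-- ---- survival of a 1-indexed position through a list of steps ----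
def pvSurv : List Int → Int → Bool
  | [], _ => true
  | s :: ss, p => if p % s = 0 then false else pvSurv ss (p - p / s)

theorem pvSurv_stop (ss : List Int) (p : Int) (hp : 1 ≤ p)
    (hbig : ∀ s ∈ ss, p < s) : pvSurv ss p = true := by
  induction ss with
  | nil => simp [pvSurv]
  | cons s ss ih =>
    have hps : p < s := hbig s (List.mem_cons_self ..)
    have hmod : p % s = p := Int.emod_eq_of_lt (by omega) hps
    have hdiv : p / s = 0 := Int.ediv_eq_zero_of_lt (by omega) hps
    simp only [pvSurv, hmod, hdiv, sub_zero]
    rw [if_neg (by omega)]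
    exact ih (fun t ht => hbig t (List.mem_cons_of_mem _ ht))

-- ---- characterisation of A's adaptive loop ----
theorem loopA_char (idx : Nat) (l : List Int) (h1 : 1 ≤ idx)
    (hsort : l.Pairwise (· < ·))
    (hval : ∀ i (h : i < l.length), 2 * (i : Int) + 1 ≤ l[i]) :
    (pvLoopA l idx).Sublist l ∧
    (pvLoopA l idx).take (idx + 1) = l.take (idx + 1) ∧
    (∀ i (h : i < (pvLoopA l idx).length), 2 * (i : Int) + 1 ≤ (pvLoopA l idx)[i]) ∧
    (∀ j (h : j < l.length),
      (l[j] ∈ pvLoopA l idx ↔ pvSurv ((pvLoopA l idx).drop idx) ((j : Int) + 1) = true)) := by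
  induction hm : l.length - idx using Nat.strong_induction_on generalizing l idx with
  | _ m ih =>
    by_cases h : idx < l.length
    · have hstep : 2 * (idx : Int) + 1 ≤ l[idx] := hval idx h
      have hsNval : ((l[idx].toNat : Nat) : Int) = l[idx] := by omega
      have hsN1 : 1 ≤ l[idx].toNat := by omega
      have hfe : pvFilterA l[idx] l = pvChunkSpec l[idx].toNat l := by
        rw [← hsNval]
        exact pvFilterA_eq_chunkSpec l[idx].toNat hsN1 l
      have hunfold : pvLoopA l idx = pvLoopA (pvChunkSpec l[idx].toNat l) (idx + 1) := by
        rw [pvLoopA, dif_pos h, hfe]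
      have hsub' : (pvChunkSpec l[idx].toNat l).Sublist l := chunk_sublist l[idx].toNat l
      have hsort' : (pvChunkSpec l[idx].toNat l).Pairwise (· < ·) := hsort.sublist hsub'
      have hval' : ∀ i (hi : i < (pvChunkSpec l[idx].toNat l).length),
          2 * (i : Int) + 1 ≤ (pvChunkSpec l[idx].toNat l)[i] := by
        intro i hi
        obtain ⟨j, hij, hj, he⟩ := chunk_index_ge l[idx].toNat hsN1 l i hi
        rw [he]
        have h1 := hval j hj
        have h2 : (i : Int) ≤ (j : Int) := by exact_mod_cast hij
        omega
      have hlen' : (pvChunkSpec l[idx].toNat l).length ≤ l.length := hsub'.length_le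
      have hpre : (pvChunkSpec l[idx].toNat l).take (idx + 1) = l.take (idx + 1) :=
        chunk_take l[idx].toNat l (idx + 1) (by omega)
      have hlen'2 : idx + 1 ≤ (pvChunkSpec l[idx].toNat l).length := by
        have hc := congrArg List.length hpre
        simp only [List.length_take] at hc
        omega
      obtain ⟨iha, ihb, ihc, ihd⟩ := ih ((pvChunkSpec l[idx].toNat l).length - (idx + 1))
        (by omega) (idx + 1) (pvChunkSpec l[idx].toNat l) (by omega) hsort' hval' rfl
      have htakeF : (pvLoopA (pvChunkSpec l[idx].toNat l) (idx + 1)).take (idx + 1)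
          = l.take (idx + 1) := by
        have e1 : ((pvLoopA (pvChunkSpec l[idx].toNat l) (idx + 1)).take (idx + 2)).take (idx + 1)
            = (pvLoopA (pvChunkSpec l[idx].toNat l) (idx + 1)).take (idx + 1) := by
          rw [List.take_take]
          congr 1
          omega
        have e2 : ((pvChunkSpec l[idx].toNat l).take (idx + 2)).take (idx + 1)
            = (pvChunkSpec l[idx].toNat l).take (idx + 1) := by
          rw [List.take_take]
          congr 1
          omega
        rw [← e1, ihb, e2, hpre]
      have hlenF : idx + 1 ≤ (pvLoopA (pvChunkSpec l[idx].toNat l) (idx + 1)).length := by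
        have hc := congrArg List.length htakeF
        simp only [List.length_take] at hc
        omega
      have hFidx : (pvLoopA (pvChunkSpec l[idx].toNat l) (idx + 1))[idx]'(by omega) = l[idx] := by
        have hq : ((pvLoopA (pvChunkSpec l[idx].toNat l) (idx + 1)).take (idx + 1))[idx]?
            = (l.take (idx + 1))[idx]? := by rw [htakeF]
        rw [List.getElem?_take, if_pos (by omega), List.getElem?_take, if_pos (by omega)] at hq
        rw [List.getElem?_eq_getElem (show idx < (pvLoopA (pvChunkSpec l[idx].toNat l) (idx + 1)).length by omega),
          List.getElem?_eq_getElem h] at hq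
        exact Option.some_injective _ hq
      refine ⟨?_, ?_, ?_, ?_⟩
      · rw [hunfold]
        exact iha.trans hsub'
      · rw [hunfold]
        exact htakeF
      · rw [hunfold]
        exact ihc
      · intro j hj
        rw [hunfold]
        have hdropF : (pvLoopA (pvChunkSpec l[idx].toNat l) (idx + 1)).drop idx
            = (pvLoopA (pvChunkSpec l[idx].toNat l) (idx + 1))[idx]'(by omega)
              :: (pvLoopA (pvChunkSpec l[idx].toNat l) (idx + 1)).drop (idx + 1) :=
          List.drop_eq_getElem_cons (by omega)
        rw [hdropF, hFidx]
        have hnodup : l.Nodup := hsort.imp (fun hab => ne_of_lt hab)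
        by_cases hrem : (j + 1) % l[idx].toNat = 0
        · have hmodz : ((j : Int) + 1) % l[idx] = 0 := by
            have hc : ((j : Int) + 1) % l[idx] = (((j + 1) % l[idx].toNat : Nat) : Int) := by
              rw [Int.natCast_emod, hsNval]
              push_cast
              ring_nf
            rw [hc, hrem]
            rfl
          have hFalse : pvSurv (l[idx] :: (pvLoopA (pvChunkSpec l[idx].toNat l) (idx + 1)).drop (idx + 1))
              ((j : Int) + 1) = false := by
            simp only [pvSurv, hmodz]
            rfl
          rw [hFalse]
          have hnotin : l[j] ∉ pvChunkSpec l[idx].toNat l := by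
            intro hmem
            obtain ⟨j2, hj2, hje, hjm⟩ := chunk_mem l[idx].toNat hsN1 l _ hmem
            have hj2j : j2 = j := (List.Nodup.getElem_inj_iff hnodup).mp hje
            rw [hj2j] at hjm
            exact hjm hrem
          have hnF : l[j] ∉ pvLoopA (pvChunkSpec l[idx].toNat l) (idx + 1) :=
            fun hmem => hnotin (iha.subset hmem)
          simp [hnF]
        · have hs2' : 2 ≤ l[idx].toNat := by omega
          have hdle : (j + 1) / l[idx].toNat ≤ j := by
            by_cases hj0 : j = 0
            · rw [hj0]
              simp [Nat.div_eq_of_lt hs2']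
            · calc (j + 1) / l[idx].toNat ≤ (j + 1) / 2 := Nat.div_le_div_left hs2' (by omega)
                _ ≤ j := by omega
          have hget := chunk_getElem l[idx].toNat hsN1 l j hj hrem
          obtain ⟨hj2lt, hj2val⟩ := List.getElem?_eq_some_iff.mp hget
          have hiff := ihd (j - (j + 1) / l[idx].toNat) hj2lt
          rw [hj2val] at hiff
          have hmodnz : ¬ ((j : Int) + 1) % l[idx] = 0 := by
            have hc : ((j : Int) + 1) % l[idx] = (((j + 1) % l[idx].toNat : Nat) : Int) := by
              rw [Int.natCast_emod, hsNval]
              push_cast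
              ring_nf
            rw [hc]
            intro hcon
            exact hrem (by exact_mod_cast hcon)
          have hdivc : ((j : Int) + 1) / l[idx] = (((j + 1) / l[idx].toNat : Nat) : Int) := by
            rw [Int.natCast_div, hsNval]
            push_cast
            ring_nf
          have harith : ((j : Int) + 1) - ((j : Int) + 1) / l[idx]
              = ((j - (j + 1) / l[idx].toNat : Nat) : Int) + 1 := by
            rw [hdivc]
            omega
          simp only [pvSurv]
          rw [if_neg hmodnz, harith]
          exact hiff
    · have hL : pvLoopA l idx = l := by rw [pvLoopA, dif_neg h]
      refine ⟨by rw [hL], by rw [hL], by rw [hL]; exact hval, ?_⟩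
      intro j hj
      rw [hL, List.drop_eq_nil_of_le (by omega)]
      simp only [pvSurv]
      simp [List.getElem_mem hj]

-- ---- B's inner loop computes pvSurv along the final lucky list ----
theorem testB_eq_surv (F : List Int) (hsort : F.Pairwise (· < ·))
    (hval : ∀ k (h : k < F.length), 2 * (k : Int) + 1 ≤ F[k])
    (t : Nat) (ht : t ≤ F.length) (p0 : Int)
    (hbig : ∀ k (h : k < F.length), t ≤ k → 1 ≤ k → p0 < F[k]) :
    ∀ i (p : Int), 1 ≤ i → 1 ≤ p → p ≤ p0 →
      pvTestB (F.take t) p i = pvSurv (F.drop i) p := by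
  suffices H : ∀ (fuel : Nat) (i : Nat) (p : Int), t - i ≤ fuel → 1 ≤ i → 1 ≤ p → p ≤ p0 →
      pvTestB (F.take t) p i = pvSurv (F.drop i) p from
    fun i p h1 h2 h3 => H t i p (by omega) h1 h2 h3
  intro fuel
  induction fuel with
  | zero =>
    intro i p hfuel hi1 hp1 hpp0
    have hit : ¬ i < t := by omega
    rw [pvTestB, dif_neg (by rw [List.length_take]; omega)]
    symm
    apply pvSurv_stop _ _ hp1
    intro sv hsv
    obtain ⟨mI, hmI, hmEq⟩ := List.mem_iff_getElem.mp hsv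
    rw [List.getElem_drop] at hmEq
    have hk : i + mI < F.length := by
      simp only [List.length_drop] at hmI
      omega
    have := hbig (i + mI) hk (by omega) (by omega)
    omega
  | succ fuel ihf =>
    intro i p hfuel hi1 hp1 hpp0
    by_cases hit : i < t
    · have hiF : i < F.length := by omega
      rw [pvTestB, dif_pos (by rw [List.length_take]; omega)]
      simp only [List.getElem_take]
      by_cases hle : F[i] ≤ p
      · rw [if_pos hle]
        have hFi2 : 2 ≤ F[i] := by
          have := hval i hiF
          omega
        have hpos : (0 : Int) < F[i] := by omega
        rw [PySem.Int.mod_eq_emod_of_pos hpos, PySem.Int.floordiv_eq_ediv_of_pos hpos]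
        rw [List.drop_eq_getElem_cons hiF]
        simp only [pvSurv]
        by_cases hmod : p % F[i] = 0
        · simp [hmod]
        · have hbeq : (p % F[i] == 0) = false := by
            simp [hmod]
          rw [hbeq]
          simp only [Bool.false_eq_true, if_false]
          rw [if_neg hmod]
          have hq := Int.mul_ediv_add_emod p F[i]
          have hq2 : 0 ≤ p % F[i] := Int.emod_nonneg p (by omega)
          have hq3 : p % F[i] < F[i] := Int.emod_lt_of_pos p hpos
          have hq4 : 0 ≤ p / F[i] := Int.ediv_nonneg (by omega) (by omega)
          have hq5 : 2 * (p / F[i]) ≤ F[i] * (p / F[i]) :=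
            mul_le_mul_of_nonneg_right (by omega) hq4
          exact ihf (i + 1) (p - p / F[i]) (by omega) (by omega) (by omega) (by omega)
      · rw [if_neg hle]
        symm
        apply pvSurv_stop _ _ hp1
        intro sv hsv
        obtain ⟨mI, hmI, hmEq⟩ := List.mem_iff_getElem.mp hsv
        rw [List.getElem_drop] at hmEq
        have hk : i + mI < F.length := by
          simp only [List.length_drop] at hmI
          omega
        rcases Nat.eq_zero_or_pos mI with hm0 | hmpos
        · subst hm0
          simp only [Nat.add_zero] at hmEq
          omega
        · have hlt : F[i] < F[i + mI] :=
            (List.pairwise_iff_getElem.mp hsort) i (i + mI) hiF hk (by omega)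
          omega
    · rw [pvTestB, dif_neg (by rw [List.length_take]; omega)]
      symm
      apply pvSurv_stop _ _ hp1
      intro sv hsv
      obtain ⟨mI, hmI, hmEq⟩ := List.mem_iff_getElem.mp hsv
      rw [List.getElem_drop] at hmEq
      have hk : i + mI < F.length := by
        simp only [List.length_drop] at hmI
        omega
      have := hbig (i + mI) hk (by omega) (by omega)
      omega

-- sorted filter-below is a prefix
theorem sorted_filter_lt (F : List Int) (hsort : F.Pairwise (· < ·)) (c : Int) :
    ∃ t, t ≤ F.length ∧ F.filter (fun v => decide (v < c)) = F.take t ∧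
      ∀ k (h : k < F.length), t ≤ k → c ≤ F[k] := by
  induction F with
  | nil => exact ⟨0, le_rfl, rfl, by intro k hk; simp at hk⟩
  | cons v rest ih =>
    obtain ⟨hv, hrest⟩ := List.pairwise_cons.mp hsort
    by_cases hvc : v < c
    · obtain ⟨t, ht, hf, hge⟩ := ih hrest
      refine ⟨t + 1, by simp only [List.length_cons]; omega, ?_, ?_⟩
      · rw [List.filter_cons, if_pos (by simpa using hvc), List.take_succ_cons, hf]
      · intro k hk htk
        match k with
        | 0 => omega
        | k + 1 =>
          simp only [List.getElem_cons_succ]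
          exact hge k (by simpa using hk) (by omega)
    · refine ⟨0, Nat.zero_le _, ?_, ?_⟩
      · rw [List.take_zero, List.filter_cons, if_neg (by simpa using hvc)]
        apply List.filter_eq_nil_iff.mpr
        intro w hw
        simp only [decide_eq_true_eq]
        have h1 : v < w := hv w hw
        omega
      · intro k hk _
        match k with
        | 0 => simpa using not_lt.mp hvc
        | k + 1 =>
          have hk' : k < rest.length := by simpa using hk
          simp only [List.getElem_cons_succ]
          have h1 : v < rest[k] := hv _ (List.getElem_mem hk')
          omega

-- advancing the filter bound past one odd candidate
theorem filter_step (F : List Int) (x : Int) (hsort : F.Pairwise (· < ·))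
    (hodd : ∀ v ∈ F, v % 2 = 1) (hxodd : x % 2 = 1) :
    F.filter (fun v => decide (v < x + 2))
      = F.filter (fun v => decide (v < x)) ++ (if x ∈ F then [x] else []) := by
  induction F with
  | nil => simp
  | cons v rest ih =>
    obtain ⟨hv, hrest⟩ := List.pairwise_cons.mp hsort
    have hvodd : v % 2 = 1 := hodd v (List.mem_cons_self ..)
    have hodd' : ∀ w ∈ rest, w % 2 = 1 := fun w hw => hodd w (List.mem_cons_of_mem _ hw)
    rcases lt_trichotomy v x with hlt | heq | hgt
    · rw [List.filter_cons, List.filter_cons, if_pos (by simp; omega), if_pos (by simpa using hlt)]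
      by_cases hxr : x ∈ rest
      · rw [if_pos (List.mem_cons_of_mem _ hxr), ih hrest hodd', if_pos hxr, List.cons_append]
      · have hnx : x ∉ v :: rest := by
          intro hmem
          rcases List.mem_cons.mp hmem with h1 | h1
          · omega
          · exact hxr h1
        rw [if_neg hnx, ih hrest hodd', if_neg hxr, List.append_nil, List.append_nil]
    · subst heq
      rw [List.filter_cons, List.filter_cons, if_pos (by simp), if_neg (by simp)]
      have hr2 : rest.filter (fun w => decide (w < v + 2)) = [] := by
        apply List.filter_eq_nil_iff.mpr
        intro w hw
        have h1 : v < w := hv w hw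
        have h2 : w % 2 = 1 := hodd' w hw
        simp only [decide_eq_true_eq]
        omega
      have hr1 : rest.filter (fun w => decide (w < v)) = [] := by
        apply List.filter_eq_nil_iff.mpr
        intro w hw
        have h1 : v < w := hv w hw
        simp only [decide_eq_true_eq]
        omega
      rw [hr1, hr2, if_pos (List.mem_cons_self ..), List.nil_append]
    · have hge2 : x + 2 ≤ v := by omega
      rw [List.filter_cons, List.filter_cons, if_neg (by simp; omega), if_neg (by simp; omega)]
      have hnr : x ∉ rest := by
        intro hmem
        have h1 : v < x := hv x hmem
        omega
      have hnx : x ∉ v :: rest := by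
        intro hmem
        rcases List.mem_cons.mp hmem with h1 | h1
        · omega
        · exact hnr h1
      rw [if_neg hnx, ih hrest hodd', if_neg hnr]

theorem pyRange_pos_cons {a b s : Int} (hs : 0 < s) (hab : a < b) :
    PySem.List.pyRange a b s = a :: PySem.List.pyRange (a + s) b s := by
  rw [PySem.List.pyRange_of_pos a b hs, PySem.List.pyRange_of_pos (a + s) b hs]
  have hT : (0 : Int) ≤ b - a - 1 := by omega
  have key : b - a + s - 1 = (b - a - 1) + 1 * s := by ring
  have hdiv : (b - a + s - 1) / s = (b - a - 1) / s + 1 := by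
    rw [key, Int.add_mul_ediv_right _ _ (by omega)]
  have hq : 0 ≤ (b - a - 1) / s := Int.ediv_nonneg hT (le_of_lt hs)
  have hcount : (if a < b then ((b - a + s - 1) / s).toNat else 0)
      = ((b - a - 1) / s).toNat + 1 := by
    rw [if_pos hab, hdiv]; omega
  have hcount' : (if a + s < b then ((b - (a + s) + s - 1) / s).toNat else 0)
      = ((b - a - 1) / s).toNat := by
    by_cases h : a + s < b
    · rw [if_pos h]; congr 2; ring
    · rw [if_neg h, Int.ediv_eq_zero_of_lt hT (by omega)]; simp
  rw [hcount, hcount', List.range_succ_eq_map]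
  simp only [List.map_cons, List.map_map]
  refine List.cons_eq_cons.mpr ⟨by simp, ?_⟩
  apply List.map_congr_left
  intro k _
  simp only [Function.comp_apply, Nat.succ_eq_add_one]
  push_cast
  ring

theorem pyRange_pos_nil {a b s : Int} (hs : 0 < s) (hab : b ≤ a) :
    PySem.List.pyRange a b s = [] := by
  rw [PySem.List.pyRange_of_pos a b hs, if_neg (by omega)]
  simp

-- ---- B's fold builds exactly F ----
theorem foldB_inv (n : Int) (F : List Int)
    (hsub : F.Sublist (PySem.List.pyRange 1 (n + 1) 2))
    (hsort : F.Pairwise (· < ·))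
    (hval : ∀ k (h : k < F.length), 2 * (k : Int) + 1 ≤ F[k])
    (hchar : ∀ j (h : j < (PySem.List.pyRange 1 (n + 1) 2).length),
      ((PySem.List.pyRange 1 (n + 1) 2)[j] ∈ F ↔ pvSurv (F.drop 1) ((j : Int) + 1) = true)) :
    ∀ (x : Int), 1 ≤ x → x % 2 = 1 →
      pvFoldB (PySem.List.pyRange x (n + 1) 2) (F.filter (fun v => decide (v < x))) = F := by
  have hodd : ∀ v ∈ F, v % 2 = 1 := by
    intro v hv
    have hm := hsub.subset hv
    rw [PySem.List.mem_pyRange_iff_of_pos (by omega)] at hm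
    obtain ⟨h1, h2, h3⟩ := hm
    omega
  intro x
  induction hm : (n + 1 - x).toNat using Nat.strong_induction_on generalizing x with
  | _ m ih =>
    intro hx1 hxodd
    by_cases hxn : x ≤ n
    · rw [pyRange_pos_cons (by omega) (by omega)]
      simp only [pvFoldB]
      obtain ⟨t, ht, hft, hge⟩ := sorted_filter_lt F hsort x
      have hp0 : PySem.Int.floordiv (x + 1) 2 = (x + 1) / 2 :=
        PySem.Int.floordiv_eq_ediv_of_pos (by omega)
      have hp0ge : 1 ≤ (x + 1) / 2 := by omega
      have hbig : ∀ k (hk : k < F.length), t ≤ k → 1 ≤ k → (x + 1) / 2 < F[k] := by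
        intro k hk hkt hk1
        have h1 : x ≤ F[k] := hge k hk hkt
        have h2 := hval k hk
        omega
      have htest := testB_eq_surv F hsort hval t ht ((x + 1) / 2) hbig 1 ((x + 1) / 2)
        le_rfl hp0ge le_rfl
      have hlenodds : (PySem.List.pyRange 1 (n + 1) 2).length = ((n + 1) / 2).toNat := by
        rw [PySem.List.pyRange_of_pos _ _ (by omega : (0:Int) < 2)]
        rw [List.length_map, List.length_range, if_pos (by omega)]
        have e : n + 1 - 1 + 2 - 1 = n + 1 := by ring
        rw [e]
      have hjlt : ((x - 1) / 2).toNat < (PySem.List.pyRange 1 (n + 1) 2).length := by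
        rw [hlenodds]
        omega
      have hq : (PySem.List.pyRange 1 (n + 1) 2)[((x - 1) / 2).toNat]? = some x := by
        rw [PySem.List.pyRange_of_pos _ _ (by omega : (0:Int) < 2)]
        rw [List.getElem?_map]
        rw [List.getElem?_range (by
          rw [PySem.List.pyRange_of_pos _ _ (by omega : (0:Int) < 2), List.length_map,
            List.length_range] at hjlt
          exact hjlt)]
        simp only [Option.map_some]
        congr 1
        omega
      have hgetx : (PySem.List.pyRange 1 (n + 1) 2)[((x - 1) / 2).toNat]'hjlt = x :=
        Option.some_injective _ (((List.getElem?_eq_getElem hjlt).symm).trans hq)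
      have hcj := hchar ((x - 1) / 2).toNat hjlt
      rw [hgetx] at hcj
      have hp0j : ((((x - 1) / 2).toNat : Nat) : Int) + 1 = (x + 1) / 2 := by omega
      rw [hp0j] at hcj
      rw [hp0, hft, htest]
      have hstep2 := filter_step F x hsort hodd hxodd
      by_cases hmem : x ∈ F
      · rw [if_pos hmem] at hstep2
        have hTrue : pvSurv (F.drop 1) ((x + 1) / 2) = true := hcj.mp hmem
        rw [if_pos hTrue]
        have hacc : F.take t ++ [x] = F.filter (fun v => decide (v < x + 2)) := by
          rw [hstep2, hft]
        rw [hacc]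
        exact ih (n + 1 - (x + 2)).toNat (by omega) (x + 2) rfl (by omega) (by omega)
      · rw [if_neg hmem] at hstep2
        have hFalse : pvSurv (F.drop 1) ((x + 1) / 2) = false := by
          cases hB : pvSurv (F.drop 1) ((x + 1) / 2)
          · rfl
          · exact absurd (hcj.mpr hB) hmem
        rw [if_neg (by rw [hFalse]; simp)]
        have hacc : F.take t = F.filter (fun v => decide (v < x + 2)) := by
          rw [hstep2, List.append_nil, hft]
        rw [hacc]
        exact ih (n + 1 - (x + 2)).toNat (by omega) (x + 2) rfl (by omega) (by omega)
    · rw [pyRange_pos_nil (by omega) (by omega)]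
      simp only [pvFoldB]
      apply List.filter_eq_self.mpr
      intro v hv
      have hm2 := hsub.subset hv
      rw [PySem.List.mem_pyRange_iff_of_pos (by omega)] at hm2
      simp only [decide_eq_true_eq]
      omega

-- ===== VERDICT (by name: the statement is the Claim_ definition above) =====
theorem lucky_numbers_up_to_py_spec : Claim_equal_lucky_numbers_up_to_py := by
  intro n _
  unfold Spec_lucky_numbers_up_to_py lucky_numbers_up_to_py lucky_numbers_up_to_py_alt
  by_cases h : n < 1
  · rw [if_pos h, if_pos h]
  · rw [if_neg h, if_neg h]
    congr 1
    have hsort : (PySem.List.pyRange 1 (n + 1) 2).Pairwise (· < ·) := by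
      rw [PySem.List.pyRange_of_pos _ _ (by omega : (0:Int) < 2)]
      apply List.pairwise_map.mpr
      apply List.Pairwise.imp ?_ List.pairwise_lt_range
      intro a b hab
      have : (a : Int) < (b : Int) := by exact_mod_cast hab
      omega
    have hval : ∀ i (hi : i < (PySem.List.pyRange 1 (n + 1) 2).length),
        2 * (i : Int) + 1 ≤ (PySem.List.pyRange 1 (n + 1) 2)[i] := by
      intro i hi
      have hi' := hi
      rw [PySem.List.pyRange_of_pos _ _ (by omega : (0:Int) < 2), List.length_map,
        List.length_range] at hi'
      have hq : (PySem.List.pyRange 1 (n + 1) 2)[i]? = some (1 + 2 * (i : Int)) := by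
        rw [PySem.List.pyRange_of_pos _ _ (by omega : (0:Int) < 2)]
        rw [List.getElem?_map, List.getElem?_range hi']
        simp
      have h2 := Option.some_injective _ (((List.getElem?_eq_getElem hi).symm).trans hq)
      omega
    obtain ⟨ha, hb, hc, hd⟩ := loopA_char 1 (PySem.List.pyRange 1 (n + 1) 2) le_rfl hsort hval
    have hF := foldB_inv n (pvLoopA (PySem.List.pyRange 1 (n + 1) 2) 1) ha (hsort.sublist ha)
      hc hd 1 le_rfl (by decide)
    have hempty : (pvLoopA (PySem.List.pyRange 1 (n + 1) 2) 1).filter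
        (fun v => decide (v < 1)) = [] := by
      apply List.filter_eq_nil_iff.mpr
      intro v hv
      have hm := ha.subset hv
      rw [PySem.List.mem_pyRange_iff_of_pos (by omega)] at hm
      simp only [decide_eq_true_eq]
      omega
    rw [hempty] at hF
    exact hF.symm
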